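-- pv_equiv track=rewrite | github.com/jaeby99/Practice | algorithm_py/strangeWord.py | solution
-- ===== SOURCE A (Python) =====
-- def solution(s):
--     d=0
--     answer=""
--     words=list(s)
--     for x in range(len(words)):
--         w="".join(words[x])
--         if words[x]==" ":
--             d=0
--         elif d==0:
--             w=w.upper()
--             d=1
--         elif d==1:
--             w=w.lower()
--             d=0
--         answer+=w
--     return answer
-- ===== SOURCE B (Python) =====
-- def solution(s):
--     return " ".join(
--         "".join(ch.upper() if i % 2 == 0 else ch.lower() for i, ch in enumerate(word))
--         for word in s.split(" ")
--     )
-- ===== Notes on version B (the rewrite author's own statement) =====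
-- stated objective: simpler
-- what changed: Replaces the flat character loop with a mutable reset flag by a split-on-single-space / per-word index-parity alternation / join decomposition.
import Mathlib
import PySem

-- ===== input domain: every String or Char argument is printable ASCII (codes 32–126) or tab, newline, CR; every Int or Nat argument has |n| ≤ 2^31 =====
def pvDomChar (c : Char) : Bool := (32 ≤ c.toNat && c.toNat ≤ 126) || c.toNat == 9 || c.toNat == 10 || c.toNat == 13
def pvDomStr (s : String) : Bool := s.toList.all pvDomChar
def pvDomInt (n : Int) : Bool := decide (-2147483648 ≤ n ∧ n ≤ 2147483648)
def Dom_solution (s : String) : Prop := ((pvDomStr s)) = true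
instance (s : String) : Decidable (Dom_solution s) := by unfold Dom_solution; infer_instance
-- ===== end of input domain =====

-- B replaces A's flat char loop with a reset flag by a split-on-single-space / alternate-per-word-index / join decomposition: a simpler decomposition, same cost.

-- ===== PORT A =====
-- loop body of A: alternation flag d, reset to 0 on a space
def stepA (st : Int × List Char) (c : Char) : Int × List Char :=
  let d := st.1
  let answer := st.2
  let w := [c]
  if c = ' ' then (0, answer ++ w)
  else if d = 0 then (1, answer ++ PySem.Chars.upper w)
  else if d = 1 then (0, answer ++ PySem.Chars.lower w)
  else (d, answer ++ w)

def solution (s : String) : String :=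
  let words := s.toList
  let r := words.foldl stepA ((0 : Int), ([] : List Char))
  String.mk r.2

-- ===== PORT B =====
-- split on " ", alternate upper/lower by index inside each word, join with " "
def solution_alt (s : String) : String :=
  let words := PySem.Chars.splitOn s.toList [' ']
  String.mk (PySem.Chars.join [' ']
    (words.map (fun w =>
      (PySem.List.enumerate w 0).map (fun p =>
        if PySem.Int.mod p.1 2 = 0 then PySem.Chars.upperChar p.2 else PySem.Chars.lowerChar p.2))))

-- ===== PRECONDITION & SPEC =====
def Spec_solution (s : String) (out : String) : Prop := out = solution_alt s
instance (s : String) (out : String) : Decidable (Spec_solution s out) := by unfold Spec_solution; infer_instance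

-- ===== CLAIM (what is proved, stated in full; the proofs are below) =====
def Claim_equal_solution : Prop := ∀ (s : String), Dom_solution s → Spec_solution s (solution s)

-- ===== LEMMAS AND PROOFS =====

-- common specification: the alternation written as structural recursion (b = true ⇔ next char uppercased)
def altSpec : Bool → List Char → List Char
  | _, [] => []
  | b, c :: cs =>
    if c = ' ' then ' ' :: altSpec true cs
    else (if b then PySem.Chars.upperChar c else PySem.Chars.lowerChar c) :: altSpec (!b) cs

-- the words of l split on single spaces, as structural recursion
def sp : List Char → List (List Char)
  | [] => [[]]
  | c :: cs => if c = ' ' then [] :: sp cs else (sp cs).modifyHead (c :: ·)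

lemma sp_ne_nil (l : List Char) : sp l ≠ [] := by
  induction l with
  | nil => simp [sp]
  | cons c cs ih =>
    simp only [sp]
    split_ifs
    · simp
    · cases h : sp cs with
      | nil => exact absurd h ih
      | cons w ws => simp [List.modifyHead]

lemma go_step_space (fuel : Nat) (cs cur : List Char) (acc : List (List Char)) :
    PySem.Chars.splitOn.go [' '] (fuel + 1) (' ' :: cs) cur acc
      = PySem.Chars.splitOn.go [' '] fuel cs [] (cur.reverse :: acc) := by
  simp [PySem.Chars.splitOn.go, List.isPrefixOf]

lemma go_step_char (fuel : Nat) (c : Char) (cs cur : List Char) (acc : List (List Char))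
    (hc : c ≠ ' ') :
    PySem.Chars.splitOn.go [' '] (fuel + 1) (c :: cs) cur acc
      = PySem.Chars.splitOn.go [' '] fuel cs (c :: cur) acc := by
  simp only [PySem.Chars.splitOn.go, List.isPrefixOf]
  simp [Ne.symm hc]

-- characterization of PySem's fuel-based splitOn.go for sep = [' ']
lemma go_spec (l : List Char) : ∀ (fuel : Nat) (cur : List Char) (acc : List (List Char)),
    l.length < fuel →
    PySem.Chars.splitOn.go [' '] fuel l cur acc
      = acc.reverse ++ (sp l).modifyHead (cur.reverse ++ ·) := by
  induction l with
  | nil =>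
    intro fuel cur acc h
    match fuel with
    | fuel + 1 => simp [PySem.Chars.splitOn.go, sp]
  | cons c cs ih =>
    intro fuel cur acc h
    match fuel with
    | fuel + 1 =>
      by_cases hc : c = ' '
      · subst hc
        rw [go_step_space, ih fuel [] (cur.reverse :: acc) (by simpa using h)]
        simp only [sp, reduceIte]
        cases sp cs <;> simp [List.modifyHead]
      · rw [go_step_char fuel c cs cur acc hc, ih fuel (c :: cur) acc (by simpa using h)]
        simp only [sp, if_neg hc]
        cases h2 : sp cs with
        | nil => exact absurd h2 (sp_ne_nil cs)
        | cons w ws => simp [List.modifyHead]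

lemma splitOn_eq_sp (l : List Char) : PySem.Chars.splitOn l [' '] = sp l := by
  rw [PySem.Chars.splitOn, go_spec l (l.length + 1) [] [] (by omega)]
  cases h : sp l with
  | nil => exact absurd h (sp_ne_nil l)
  | cons w ws => simp [List.modifyHead]

-- A's fold computes altSpec
lemma foldA_spec (cs : List Char) : ∀ (d : Int) (acc : List Char), d = 0 ∨ d = 1 →
    (cs.foldl stepA (d, acc)).2 = acc ++ altSpec (d == 0) cs := by
  induction cs with
  | nil => intro d acc _; simp [altSpec]
  | cons c cs ih =>
    intro d acc hd
    rw [List.foldl_cons]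
    by_cases hc : c = ' '
    · subst hc
      rw [show stepA (d, acc) ' ' = (0, acc ++ [' ']) by simp [stepA]]
      rw [ih 0 (acc ++ [' ']) (Or.inl rfl)]
      simp [altSpec]
    · rcases hd with h0 | h1
      · subst h0
        rw [show stepA (0, acc) c = (1, acc ++ PySem.Chars.upper [c]) by simp [stepA, hc]]
        rw [ih 1 _ (Or.inr rfl)]
        simp [altSpec, hc, PySem.Chars.upper]
      · subst h1
        rw [show stepA (1, acc) c = (0, acc ++ PySem.Chars.lower [c]) by simp [stepA, hc]]
        rw [ih 0 _ (Or.inl rfl)]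
        simp [altSpec, hc, PySem.Chars.lower]

-- B's per-word processing, started at index k
def procK (k : Int) (w : List Char) : List Char :=
  (PySem.List.enumerate w k).map (fun p =>
    if PySem.Int.mod p.1 2 = 0 then PySem.Chars.upperChar p.2 else PySem.Chars.lowerChar p.2)

lemma procK_nil (k : Int) : procK k [] = [] := by simp [procK, PySem.List.enumerate_nil]

lemma mod_two_natCast (k : Nat) : PySem.Int.mod (k : Int) 2 = ((k % 2 : Nat) : Int) := by
  simp [PySem.Int.mod, Int.fmod_eq_emod]

lemma procK_cons (k : Nat) (c : Char) (w : List Char) :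
    procK (k : Int) (c :: w)
      = (if k % 2 = 0 then PySem.Chars.upperChar c else PySem.Chars.lowerChar c)
        :: procK ((k + 1 : Nat) : Int) w := by
  simp only [procK, PySem.List.enumerate_cons, List.map_cons, mod_two_natCast]
  push_cast
  by_cases hk : k % 2 = 0 <;> simp [hk] <;> omega

-- joining the processed words, word list given as sp l, head processed from index k
def bjoin (k : Int) : List (List Char) → List Char
  | [] => []
  | w :: ws => procK k w ++ ws.flatMap (fun w => ' ' :: procK 0 w)

lemma bjoin_sp (l : List Char) : ∀ (k : Nat),
    bjoin (k : Int) (sp l) = altSpec (k % 2 == 0) l := by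
  induction l with
  | nil => intro k; simp [sp, bjoin, procK_nil, altSpec]
  | cons c cs ih =>
    intro k
    by_cases hc : c = ' '
    · subst hc
      simp only [sp, reduceIte]
      cases h2 : sp cs with
      | nil => exact absurd h2 (sp_ne_nil cs)
      | cons w ws =>
        have h0 := ih 0
        rw [h2] at h0
        simp only [Nat.cast_zero] at h0
        simp only [bjoin] at h0 ⊢
        simp only [Nat.zero_mod] at h0
        simp [altSpec, procK_nil, h0]
    · simp only [sp, if_neg hc]
      cases h2 : sp cs with
      | nil => exact absurd h2 (sp_ne_nil cs)
      | cons w ws =>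
        have h1 := ih (k + 1)
        rw [h2] at h1
        simp only [List.modifyHead, bjoin, procK_cons, altSpec, if_neg hc] at h1 ⊢
        rw [List.cons_append, h1]
        have hpar : ((k + 1) % 2 == 0) = !(k % 2 == 0) := by
          rcases Nat.mod_two_eq_zero_or_one k with hk | hk <;> simp [Nat.add_mod, hk]
        rw [hpar]
        by_cases hkk : k % 2 = 0 <;> simp [hkk]

lemma join_flatMap (proc : List Char → List Char) (w : List Char) (ws : List (List Char)) :
    PySem.Chars.join [' '] ((w :: ws).map proc)
      = proc w ++ ws.flatMap (fun w => ' ' :: proc w) := by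
  induction ws generalizing w with
  | nil => simp [PySem.Chars.join_singleton]
  | cons w' ws ih =>
    simp only [List.map_cons] at ih ⊢
    rw [PySem.Chars.join_cons_cons, ih w']
    simp

-- ===== VERDICT (by name: the statement is the Claim_ definition above) =====
theorem solution_spec : Claim_equal_solution := by
  intro s _
  unfold Spec_solution solution solution_alt
  simp only []
  rw [foldA_spec s.toList 0 [] (Or.inl rfl), splitOn_eq_sp]
  cases h : sp s.toList with
  | nil => exact absurd h (sp_ne_nil s.toList)
  | cons w ws =>
    rw [join_flatMap]
    have hb := bjoin_sp s.toList 0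
    rw [h] at hb
    simp only [Nat.cast_zero] at hb
    show String.mk ([] ++ altSpec (0 == 0) s.toList) = String.mk (bjoin 0 (w :: ws))
    rw [hb]
    simp
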